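-- pv_equiv track=rewrite | github.com/ZhangJiePKU/6mAProject | extractIPDandPW.py | ipd_pw_add_del
-- ===== SOURCE A (Python) =====
-- def ipd_pw_add_del(idx_tuples,IpdRoPw):
--         IpdRoPw_idx=[]
--         for i in idx_tuples:
--                 IpdRoPw_idx.append(i[0])
--         idx_del=[m for m, j in enumerate(IpdRoPw_idx) if j == None]
--         for k in idx_del:
--                 IpdRoPw.insert(k,0)
--         return IpdRoPw
-- ===== SOURCE B (Python) =====
-- def ipd_pw_add_del(idx_tuples, IpdRoPw):
--     none_pos = [m for m, t in enumerate(idx_tuples) if t[0] is None]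
--     out = []
--     j = 0
--     n = len(IpdRoPw)
--     for k in none_pos:
--         while len(out) < k and j < n:
--             out.append(IpdRoPw[j])
--             j += 1
--         out.append(0)
--     out.extend(IpdRoPw[j:])
--     IpdRoPw[:] = out
--     return IpdRoPw
-- ===== Notes on version B (the rewrite author's own statement) =====
-- stated objective: alternative
-- what changed: Replaces the loop of list.insert calls (each shifting the tail of the list) with a single merge pass that copies source elements and emits a 0 at each None-index.
-- outside the precondition, e.g. on ipd_pw_add_del([()], [1, 2]): A raises IndexError, B raises IndexError
import Mathlib
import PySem

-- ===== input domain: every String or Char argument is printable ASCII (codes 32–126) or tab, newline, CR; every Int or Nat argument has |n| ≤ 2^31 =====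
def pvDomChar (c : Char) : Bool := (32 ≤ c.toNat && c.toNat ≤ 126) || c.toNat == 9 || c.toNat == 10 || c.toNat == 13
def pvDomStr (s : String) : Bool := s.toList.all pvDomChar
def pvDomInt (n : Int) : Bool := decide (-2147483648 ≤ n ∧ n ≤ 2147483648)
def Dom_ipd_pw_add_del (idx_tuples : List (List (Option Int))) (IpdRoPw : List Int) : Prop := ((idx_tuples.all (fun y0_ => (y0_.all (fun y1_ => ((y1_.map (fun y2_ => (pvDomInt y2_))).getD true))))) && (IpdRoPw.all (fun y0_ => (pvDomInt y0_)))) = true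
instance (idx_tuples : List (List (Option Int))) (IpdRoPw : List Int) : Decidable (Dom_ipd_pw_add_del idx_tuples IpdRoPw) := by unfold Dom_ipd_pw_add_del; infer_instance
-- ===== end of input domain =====

-- B replaces A's repeated list.insert calls with one merge pass placing a 0 at each
-- None-index (objective: alternative). A mutates IpdRoPw in place; B performs the same
-- in-place mutation, and the equivalence proved here is about the RETURN value.

-- ===== PORT A =====
def ipd_pw_add_del (idx_tuples : List (List (Option Int))) (IpdRoPw : List Int) : List Int :=
  -- for i in idx_tuples: IpdRoPw_idx.append(i[0])   (i[0] raises on empty i: excluded by Pre_)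
  let IpdRoPw_idx : List (Option Int) :=
    idx_tuples.foldl (fun acc i => acc ++ [(PySem.List.pyGet? i 0).getD none]) []
  -- idx_del = [m for m, j in enumerate(IpdRoPw_idx) if j == None]
  let idx_del : List Int :=
    (PySem.List.enumerate IpdRoPw_idx).foldl
      (fun acc p => if p.2 = none then acc ++ [p.1] else acc) []
  -- for k in idx_del: IpdRoPw.insert(k, 0)
  idx_del.foldl (fun lst k => PySem.List.insert lst k 0) IpdRoPw

-- ===== PORT B =====
-- the inner 'while len(out) < k and j < n' loop: copy source elements until position k (or source ends)
def pvFill (k : Int) (out : List Int) (src : List Int) : List Int × List Int :=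
  match src with
  | [] => (out, [])
  | x :: rest =>
      if (out.length : Int) < k then pvFill k (out ++ [x]) rest else (out, x :: rest)

-- the 'for k in none_pos' loop; at the end out.extend(IpdRoPw[j:])
def pvGo (ks : List Int) (out : List Int) (src : List Int) : List Int :=
  match ks with
  | [] => out ++ src
  | k :: ks' =>
      let p := pvFill k out src
      pvGo ks' (p.1 ++ [0]) p.2

def ipd_pw_add_del_alt (idx_tuples : List (List (Option Int))) (IpdRoPw : List Int) : List Int :=
  -- none_pos = [m for m, t in enumerate(idx_tuples) if t[0] is None]
  let none_pos : List Int :=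
    (PySem.List.enumerate idx_tuples).foldl
      (fun acc p => if (PySem.List.pyGet? p.2 0).getD none = none then acc ++ [p.1] else acc) []
  pvGo none_pos [] IpdRoPw

-- ===== PRECONDITION & SPEC =====
-- Pre_ excludes inputs containing an empty inner tuple, on which A's 'i[0]' raises IndexError.
def Pre_ipd_pw_add_del (idx_tuples : List (List (Option Int))) (IpdRoPw : List Int) : Prop :=
  ∀ t ∈ idx_tuples, t ≠ []
instance (idx_tuples : List (List (Option Int))) (IpdRoPw : List Int) : Decidable (Pre_ipd_pw_add_del idx_tuples IpdRoPw) := by unfold Pre_ipd_pw_add_del; infer_instance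

def pvWitness_ipd_pw_add_del : List (List (Option Int)) × List Int :=
  ([[some 1], [none], [some 3, some 4]], [7, 8])

def Spec_ipd_pw_add_del (idx_tuples : List (List (Option Int))) (IpdRoPw : List Int) (out : List Int) : Prop := out = ipd_pw_add_del_alt idx_tuples IpdRoPw
instance (idx_tuples : List (List (Option Int))) (IpdRoPw : List Int) (out : List Int) : Decidable (Spec_ipd_pw_add_del idx_tuples IpdRoPw out) := by unfold Spec_ipd_pw_add_del; infer_instance

-- ===== CLAIM (what is proved, stated in full; the proofs are below) =====
def Claim_equal_ipd_pw_add_del : Prop := ∀ (idx_tuples : List (List (Option Int))) (IpdRoPw : List Int), Dom_ipd_pw_add_del idx_tuples IpdRoPw → Pre_ipd_pw_add_del idx_tuples IpdRoPw → Spec_ipd_pw_add_del idx_tuples IpdRoPw (ipd_pw_add_del idx_tuples IpdRoPw)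

-- ===== LEMMAS AND PROOFS =====

-- A's append-loop is map
theorem pv_foldl_append_map {α β : Type} (f : α → β) :
    ∀ (xs : List α) (acc : List β),
      xs.foldl (fun acc i => acc ++ [f i]) acc = acc ++ xs.map f := by
  intro xs
  induction xs with
  | nil => intro acc; simp
  | cons x xs ih => intro acc; simp [List.foldl, ih]

-- the filter-comprehension foldl as filter-then-map
theorem pv_foldl_filter_map {α : Type} (P : Int × α → Prop) [DecidablePred P] :
    ∀ (l : List (Int × α)) (acc : List Int),
      l.foldl (fun acc p => if P p then acc ++ [p.1] else acc) acc
        = acc ++ (l.filter (fun p => decide (P p))).map (·.1) := by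
  intro l
  induction l with
  | nil => intro acc; simp
  | cons x xs ih =>
      intro acc
      by_cases h : P x
      · simp [List.foldl, h, ih]
      · simp [List.foldl, h, ih]

-- both comprehensions produce the same index list
theorem pv_indices_eq (f : List (Option Int) → Option Int) :
    ∀ (xs : List (List (Option Int))) (s : Int),
      (PySem.List.enumerate (xs.map f) s).filter (fun p => decide (p.2 = none))
        = ((PySem.List.enumerate xs s).filter (fun p => decide (f p.2 = none))).map
            (fun p => (p.1, f p.2)) := by
  intro xs
  induction xs with
  | nil => intro s; simp [PySem.List.enumerate_nil]
  | cons x xs ih =>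
      intro s
      by_cases h : f x = none <;>
        simp [PySem.List.enumerate_cons, h, ih]

-- clamping insert at a nonnegative position
theorem pv_insert_clamp (xs : List Int) (k : Int) (v : Int) (h : 0 ≤ k) :
    PySem.List.insert xs k v = xs.take k.toNat ++ v :: xs.drop k.toNat := by
  have hmin : (min k (xs.length : Int)).toNat = min k.toNat xs.length := by omega
  simp only [PySem.List.insert, PySem.List.sliceIndices]
  have hk : ¬ ((1 : Int) < 0) := by norm_num
  simp only [if_neg hk, if_neg (by omega : ¬ k < 0)]
  rw [hmin]
  congr 1
  · rw [List.take_eq_take_iff]; omega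
  · congr 1
    rcases Nat.le_total xs.length k.toNat with h' | h'
    · rw [Nat.min_eq_right h', List.drop_of_length_le h', List.drop_of_length_le] <;> omega
    · rw [Nat.min_eq_left h']

theorem pv_fill_eq (k : Int) :
    ∀ (src out : List Int), (out.length : Int) ≤ k →
      pvFill k out src
        = (out ++ src.take (k - out.length).toNat, src.drop (k - out.length).toNat) := by
  intro src
  induction src with
  | nil => intro out h; simp [pvFill]
  | cons x rest ih =>
      intro out h
      by_cases hlt : (out.length : Int) < k
      · have h1 : (k - (out.length : Int)).toNat = (k - ((out.length : Int) + 1)).toNat + 1 := by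
          omega
        rw [pvFill, if_pos hlt, ih (out ++ [x]) (by simp; omega)]
        simp [h1, List.take_succ_cons, List.drop_succ_cons]
      · have h0 : (k - (out.length : Int)).toNat = 0 := by omega
        rw [pvFill, if_neg hlt]
        simp [h0]

theorem pv_go_eq :
    ∀ (ks : List Int) (out src : List Int),
      ks.Pairwise (· < ·) → (∀ k ∈ ks, (out.length : Int) ≤ k) →
      pvGo ks out src
        = ks.foldl (fun lst k => PySem.List.insert lst k 0) (out ++ src) := by
  intro ks
  induction ks with
  | nil => intro out src _ _; simp [pvGo]
  | cons k ks' ih =>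
      intro out src hpw hge
      have hk : (out.length : Int) ≤ k := hge k (by simp)
      have hk0 : (0 : Int) ≤ k := le_trans (by positivity) hk
      rw [pvGo, pv_fill_eq k src out hk, List.foldl_cons,
          pv_insert_clamp (out ++ src) k 0 hk0]
      have htake : (out ++ src).take k.toNat
          = out ++ src.take (k - (out.length : Int)).toNat := by
        rw [List.take_append, List.take_of_length_le (show out.length ≤ k.toNat by omega),
            show (k - (out.length : Int)).toNat = k.toNat - out.length by omega]
      have hdrop : (out ++ src).drop k.toNat
          = src.drop (k - (out.length : Int)).toNat := by
        rw [List.drop_append, List.drop_of_length_le (show out.length ≤ k.toNat by omega),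
            show (k - (out.length : Int)).toNat = k.toNat - out.length by omega]
        simp only [List.nil_append]
      rw [htake, hdrop]
      have := ih ((out ++ src.take (k - (out.length : Int)).toNat) ++ [0])
        (src.drop (k - (out.length : Int)).toNat)
        (List.Pairwise.of_cons hpw)
        (by
          intro k' hk'
          have hlt : k < k' := (List.pairwise_cons.mp hpw).1 k' hk'
          have hlen : ((out ++ src.take (k - (out.length : Int)).toNat) ++ [0]).length
              = out.length + (src.take (k - (out.length : Int)).toNat).length + 1 := by
            simp; omega
          rw [hlen]
          have : (src.take (k - (out.length : Int)).toNat).length ≤ (k - (out.length : Int)).toNat :=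
            by simp
          omega)
      simp only at this ⊢
      rw [this]
      congr 1
      simp

-- ===== VERDICT (by name: the statement is the Claim_ definition above) =====
theorem ipd_pw_add_del_spec : Claim_equal_ipd_pw_add_del := by
  intro idx_tuples IpdRoPw _ _
  unfold Spec_ipd_pw_add_del ipd_pw_add_del ipd_pw_add_del_alt
  simp only
  set f : List (Option Int) → Option Int := fun i => (PySem.List.pyGet? i 0).getD none with hf
  rw [pv_foldl_append_map f idx_tuples []]
  simp only [List.nil_append]
  rw [pv_foldl_filter_map (fun p => p.2 = none) _ [],
      pv_foldl_filter_map (fun p => f p.2 = none) _ []]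
  simp only [List.nil_append]
  have hidx := pv_indices_eq f idx_tuples 0
  have hmapeq :
      ((PySem.List.enumerate (idx_tuples.map f) 0).filter (fun p => decide (p.2 = none))).map (·.1)
        = ((PySem.List.enumerate idx_tuples 0).filter (fun p => decide (f p.2 = none))).map (·.1) := by
    rw [hidx, List.map_map]; rfl
  rw [hmapeq]
  set ks := ((PySem.List.enumerate idx_tuples 0).filter (fun p => decide (f p.2 = none))).map (·.1)
    with hks
  have hpw : ks.Pairwise (· < ·) := by
    rw [hks]
    refine List.Pairwise.map _ (fun a b h => h) ?_
    exact List.Pairwise.filter _ (PySem.List.pairwise_lt_enumerate idx_tuples 0)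
  have hge : ∀ k ∈ ks, (([] : List Int).length : Int) ≤ k := by
    intro k hk
    rw [hks] at hk
    simp only [List.mem_map, List.mem_filter] at hk
    obtain ⟨p, ⟨hpmem, _⟩, hp1⟩ := hk
    rw [PySem.List.mem_enumerate_iff] at hpmem
    obtain ⟨j, hj, rfl⟩ := hpmem
    simp at hp1 ⊢
    omega
  rw [pv_go_eq ks [] IpdRoPw hpw hge]
  simp
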